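-- pv_equiv track=rewrite | github.com/seregazakharin/tfl_lab3 | main.py | build_bigramms
-- ===== SOURCE A (Python) =====
-- from collections import defaultdict, deque
--
-- def build_bigramms(grammar, terminals, FIRST, FOLLOW, LAST, PRECEDE):
--     bigram_matrix = defaultdict(set)
--
--     # Собираем все правила в единый список
--     extended_rules = []
--     for rules in grammar.values():
--         extended_rules.extend(rules)
--
--     # Проход по всем возможным парам терминалов
--     for y1 in terminals:
--         for y2 in terminals:
--             # Проверка на наличие пары (y1, y2) в правых частях правил
--             pair_exists = False
--             for rule in extended_rules:
--                 for i in range(len(rule) - 1):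
--                     if (y1, y2) == (rule[i], rule[i + 1]):
--                         pair_exists = True
--                         break
--                 if pair_exists:
--                     break
--
--             if pair_exists:
--                 bigram_matrix[y1].add(y2)
--
--             condition_1 = any(y1 in LAST[nt] and y2 in FOLLOW[nt] for nt in grammar)
--             condition_2 = any(y1 in PRECEDE[nt] and y2 in FIRST[nt] for nt in grammar)
--             condition_3 = any(
--                 y1 in LAST[nt1] and y2 in FIRST[nt2] and y2 in FOLLOW[nt1]
--                 for nt1 in grammar for nt2 in grammar
--             )
--
--             if condition_1 or condition_2 or condition_3:
--                 bigram_matrix[y1].add(y2)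
--
--     return bigram_matrix
-- ===== SOURCE B (Python) =====
-- def build_bigramms(grammar, terminals, FIRST, FOLLOW, LAST, PRECEDE):
--     # One pass over the rules and over the set products builds the full set of
--     # admissible bigrams; the terminal-pair double loop then only does O(1)
--     # membership tests.  condition_3 of the original (y1 in LAST[nt1] and
--     # y2 in FIRST[nt2] and y2 in FOLLOW[nt1]) is subsumed by the
--     # LAST[nt] x FOLLOW[nt] products, so it needs no loop of its own.
--     pairs = set()
--     for rules in grammar.values():
--         for rule in rules:
--             for i in range(len(rule) - 1):
--                 pairs.add((rule[i], rule[i + 1]))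
--     for nt in grammar:
--         for a in LAST[nt]:
--             for b in FOLLOW[nt]:
--                 pairs.add((a, b))
--         for a in PRECEDE[nt]:
--             for b in FIRST[nt]:
--                 pairs.add((a, b))
--     res = {}
--     for y1 in dict.fromkeys(terminals):
--         vals = [y2 for y2 in dict.fromkeys(terminals) if (y1, y2) in pairs]
--         if vals:
--             res[y1] = set(vals)
--     return res
-- ===== Notes on version B (the rewrite author's own statement) =====
-- stated objective: faster
-- what changed: Instead of rescanning all rules and all nonterminal pairs for every terminal pair, B precomputes one set of admissible bigrams in a single pass over the rules and over the LAST x FOLLOW / PRECEDE x FIRST set products (condition_3 is subsumed by condition_1, so it is dropped), and then fills the matrix with O(1) membership tests per terminal pair.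
-- outside the precondition, e.g. on build_bigramms({'S': [['a']]}, [], {}, {}, {}, {}): A returns {}, B raises KeyError
import Mathlib
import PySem

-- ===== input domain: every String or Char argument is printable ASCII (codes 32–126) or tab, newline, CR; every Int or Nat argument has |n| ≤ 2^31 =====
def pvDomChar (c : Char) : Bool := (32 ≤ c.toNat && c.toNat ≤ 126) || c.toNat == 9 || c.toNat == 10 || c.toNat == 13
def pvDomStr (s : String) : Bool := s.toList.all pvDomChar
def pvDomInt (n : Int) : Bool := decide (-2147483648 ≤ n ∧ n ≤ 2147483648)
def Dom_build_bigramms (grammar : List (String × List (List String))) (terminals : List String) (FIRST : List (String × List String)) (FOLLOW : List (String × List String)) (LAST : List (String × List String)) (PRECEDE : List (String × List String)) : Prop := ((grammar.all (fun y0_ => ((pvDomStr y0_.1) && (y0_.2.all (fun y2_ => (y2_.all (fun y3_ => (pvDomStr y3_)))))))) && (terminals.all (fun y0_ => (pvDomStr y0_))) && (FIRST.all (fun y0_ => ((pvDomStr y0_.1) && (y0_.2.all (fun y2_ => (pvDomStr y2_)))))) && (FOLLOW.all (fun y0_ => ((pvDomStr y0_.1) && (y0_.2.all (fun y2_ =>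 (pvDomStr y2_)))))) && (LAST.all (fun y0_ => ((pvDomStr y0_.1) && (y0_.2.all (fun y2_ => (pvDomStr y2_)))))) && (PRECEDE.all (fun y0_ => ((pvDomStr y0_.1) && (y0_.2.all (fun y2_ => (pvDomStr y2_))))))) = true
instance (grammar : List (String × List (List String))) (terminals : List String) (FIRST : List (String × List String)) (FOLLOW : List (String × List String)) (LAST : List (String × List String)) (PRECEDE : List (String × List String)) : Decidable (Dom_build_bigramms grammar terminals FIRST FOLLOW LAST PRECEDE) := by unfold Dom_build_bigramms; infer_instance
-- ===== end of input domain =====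

-- B replaces A's per-terminal-pair rescans of the rules and of the nonterminal sets by one
-- precomputed set of admissible bigram pairs (condition_3 being subsumed by condition_1's
-- LAST×FOLLOW products); the proof shows both builds produce the same dict.
-- A mutates nothing; the equivalence is about the return value.

-- ===== PORT A =====
-- shared lookup helper: TBL[nt]; exact under Pre_ (the key is present); on a missing key the
-- Python raises KeyError, which Pre_build_bigramms excludes.
def pvTbl (t : List (String × List String)) (nt : String) : List String :=
  (PySem.Dict.mk t).getD nt []

-- the 'pair_exists' scan with its two breaks = any over rules / over i; rule[i] with
-- 0 ≤ i < len(rule)-1 is in range, so List.getD is exact there.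
def pvPairExists (extended_rules : List (List String)) (y1 y2 : String) : Bool :=
  extended_rules.any (fun rule =>
    (List.range (rule.length - 1)).any (fun i =>
      rule.getD i "" == y1 && rule.getD (i + 1) "" == y2))

def build_bigramms (grammar : List (String × List (List String))) (terminals : List String) (FIRST : List (String × List String)) (FOLLOW : List (String × List String)) (LAST : List (String × List String)) (PRECEDE : List (String × List String)) : List (String × List String) :=
  let extended_rules := (PySem.Dict.mk grammar).values.foldl (fun acc rules => acc ++ rules) []
  let nts := (PySem.Dict.mk grammar).keys
  let bm : PySem.Dict String (PySem.Set String) :=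
    terminals.foldl (fun bm y1 =>
      terminals.foldl (fun bm y2 =>
        let pair_exists := pvPairExists extended_rules y1 y2
        let bm := if pair_exists then bm.modify y1 [] (fun s => PySem.Set.add s y2) else bm
        let condition_1 := nts.any (fun nt =>
          (pvTbl LAST nt).contains y1 && (pvTbl FOLLOW nt).contains y2)
        let condition_2 := nts.any (fun nt =>
          (pvTbl PRECEDE nt).contains y1 && (pvTbl FIRST nt).contains y2)
        let condition_3 := nts.any (fun nt1 => nts.any (fun nt2 =>
          (pvTbl LAST nt1).contains y1 && (pvTbl FIRST nt2).contains y2 &&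
            (pvTbl FOLLOW nt1).contains y2))
        if condition_1 || condition_2 || condition_3 then
          bm.modify y1 [] (fun s => PySem.Set.add s y2)
        else bm) bm) PySem.Dict.empty
  bm.items

-- ===== PORT B =====
-- the precomputed set of admissible bigrams (B's 'pairs')
def pvPairs (grammar : List (String × List (List String))) (FIRST : List (String × List String)) (FOLLOW : List (String × List String)) (LAST : List (String × List String)) (PRECEDE : List (String × List String)) : PySem.Set (String × String) :=
  let pairs : PySem.Set (String × String) :=
    (PySem.Dict.mk grammar).values.foldl (fun ps rules =>
      rules.foldl (fun ps rule =>
        (List.range (rule.length - 1)).foldl (fun ps i =>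
          PySem.Set.add ps (rule.getD i "", rule.getD (i + 1) "")) ps) ps) PySem.Set.empty
  (PySem.Dict.mk grammar).keys.foldl (fun ps nt =>
    let ps := (pvTbl LAST nt).foldl (fun ps a =>
      (pvTbl FOLLOW nt).foldl (fun ps b => PySem.Set.add ps (a, b)) ps) ps
    (pvTbl PRECEDE nt).foldl (fun ps a =>
      (pvTbl FIRST nt).foldl (fun ps b => PySem.Set.add ps (a, b)) ps) ps) pairs

def build_bigramms_alt (grammar : List (String × List (List String))) (terminals : List String) (FIRST : List (String × List String)) (FOLLOW : List (String × List String)) (LAST : List (String × List String)) (PRECEDE : List (String × List String)) : List (String × List String) :=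
  let pairs := pvPairs grammar FIRST FOLLOW LAST PRECEDE
  let dts := PySem.List.dedup terminals
  let res : PySem.Dict String (PySem.Set String) :=
    dts.foldl (fun res y1 =>
      let vals := dts.filter (fun y2 => PySem.Set.contains pairs (y1, y2))
      if vals.isEmpty then res else res.insert y1 (PySem.Set.ofList vals)) PySem.Dict.empty
  res.items

-- ===== PRECONDITION & SPEC =====
-- Pre_ excludes inputs where some grammar nonterminal is missing from FIRST/FOLLOW/LAST/PRECEDE:
-- there Python A raises KeyError on essentially every input (only generator short-circuiting or
-- empty terminals can still let A return, e.g. terminals = []), and B raises KeyError as well.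
def Pre_build_bigramms (grammar : List (String × List (List String))) (terminals : List String) (FIRST : List (String × List String)) (FOLLOW : List (String × List String)) (LAST : List (String × List String)) (PRECEDE : List (String × List String)) : Prop :=
  (grammar.all (fun g =>
    (FIRST.map Prod.fst).contains g.1 && (FOLLOW.map Prod.fst).contains g.1 &&
    (LAST.map Prod.fst).contains g.1 && (PRECEDE.map Prod.fst).contains g.1)) = true
instance (grammar : List (String × List (List String))) (terminals : List String) (FIRST : List (String × List String)) (FOLLOW : List (String × List String)) (LAST : List (String × List String)) (PRECEDE : List (String × List String)) : Decidable (Pre_build_bigramms grammar terminals FIRST FOLLOW LAST PRECEDE) := by unfold Pre_build_bigramms; infer_instance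

def pvWitness_build_bigramms : (List (String × List (List String))) × List String × (List (String × List String)) × (List (String × List String)) × (List (String × List String)) × (List (String × List String)) :=
  ([("S", [["a", "b"]])], ["a", "b"], [("S", ["a"])], [("S", ["b"])], [("S", ["b"])], [("S", ["a"])])

def Spec_build_bigramms (grammar : List (String × List (List String))) (terminals : List String) (FIRST : List (String × List String)) (FOLLOW : List (String × List String)) (LAST : List (String × List String)) (PRECEDE : List (String × List String)) (out : List (String × List String)) : Prop := out = build_bigramms_alt grammar terminals FIRST FOLLOW LAST PRECEDE
instance (grammar : List (String × List (List String))) (terminals : List String) (FIRST : List (String × List String)) (FOLLOW : List (String × List String)) (LAST : List (String × List String)) (PRECEDE : List (String × List String)) (out : List (String × List String)) : Decidable (Spec_build_bigramms grammar terminals FIRST FOLLOW LAST PRECEDE out) := by unfold Spec_build_bigramms; infer_instance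

-- ===== CLAIM (what is proved, stated in full; the proofs are below) =====
def Claim_equal_build_bigramms : Prop := ∀ (grammar : List (String × List (List String))) (terminals : List String) (FIRST : List (String × List String)) (FOLLOW : List (String × List String)) (LAST : List (String × List String)) (PRECEDE : List (String × List String)), Dom_build_bigramms grammar terminals FIRST FOLLOW LAST PRECEDE → Pre_build_bigramms grammar terminals FIRST FOLLOW LAST PRECEDE → Spec_build_bigramms grammar terminals FIRST FOLLOW LAST PRECEDE (build_bigramms grammar terminals FIRST FOLLOW LAST PRECEDE)

-- ===== LEMMAS AND PROOFS =====

-- A's per-pair decision, written exactly as the disjunction its two conditional adds amount to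
def pvP (grammar : List (String × List (List String))) (FIRST : List (String × List String)) (FOLLOW : List (String × List String)) (LAST : List (String × List String)) (PRECEDE : List (String × List String)) (y1 y2 : String) : Bool :=
  let extended_rules := (PySem.Dict.mk grammar).values.foldl (fun acc rules => acc ++ rules) []
  let nts := (PySem.Dict.mk grammar).keys
  pvPairExists extended_rules y1 y2 ||
  (nts.any (fun nt => (pvTbl LAST nt).contains y1 && (pvTbl FOLLOW nt).contains y2) ||
   nts.any (fun nt => (pvTbl PRECEDE nt).contains y1 && (pvTbl FIRST nt).contains y2) ||
   nts.any (fun nt1 => nts.any (fun nt2 =>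
     (pvTbl LAST nt1).contains y1 && (pvTbl FIRST nt2).contains y2 &&
       (pvTbl FOLLOW nt1).contains y2)))

-- B's per-pair decision
def pvQ (grammar : List (String × List (List String))) (FIRST : List (String × List String)) (FOLLOW : List (String × List String)) (LAST : List (String × List String)) (PRECEDE : List (String × List String)) (y1 y2 : String) : Bool :=
  PySem.Set.contains (pvPairs grammar FIRST FOLLOW LAST PRECEDE) (y1, y2)

def pvDadd (d : PySem.Dict String (PySem.Set String)) (y1 y2 : String) : PySem.Dict String (PySem.Set String) :=
  d.modify y1 [] (fun s => PySem.Set.add s y2)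

def pvAstep (p : String → String → Bool) (ts : List String) (d : PySem.Dict String (PySem.Set String)) (y1 : String) : PySem.Dict String (PySem.Set String) :=
  (ts.filter (p y1)).foldl (fun d y2 => pvDadd d y1 y2) d

def pvBstep (p : String → String → Bool) (dts : List String) (d : PySem.Dict String (PySem.Set String)) (y1 : String) : PySem.Dict String (PySem.Set String) :=
  let vals := dts.filter (fun y2 => p y1 y2)
  if vals.isEmpty then d else d.insert y1 (PySem.Set.ofList vals)

-- membership through a fold that only adds elements
lemma pv_mem_foldl {α β : Type} [BEq α] [LawfulBEq α] (l : List β) (step : PySem.Set α → β → PySem.Set α) (Q : α → β → Prop) (h : ∀ s b x, x ∈ step s b ↔ x ∈ s ∨ Q x b) (s0 : PySem.Set α) (x : α) : x ∈ l.foldl step s0 ↔ x ∈ s0 ∨ ∃ b ∈ l, Q x b := by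
  induction l generalizing s0 with
  | nil => simp
  | cons b l ih => simp [List.foldl_cons, ih, h]; tauto

lemma pv_mem_prod_foldl (A B : List String) (s : PySem.Set (String × String)) (x : String × String) :
    x ∈ A.foldl (fun ps a => B.foldl (fun ps b => PySem.Set.add ps (a, b)) ps) s ↔
      x ∈ s ∨ ∃ a ∈ A, ∃ b ∈ B, x = (a, b) := by
  refine pv_mem_foldl A _ (fun x a => ∃ b ∈ B, x = (a, b)) ?_ s x
  intro s a x
  exact pv_mem_foldl B _ (fun x b => x = (a, b)) (fun s b x => PySem.Set.mem_add s (a, b) x) s x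

lemma pvPairs_mem (grammar : List (String × List (List String))) (FIRST FOLLOW LAST PRECEDE : List (String × List String)) (y1 y2 : String) :
    (y1, y2) ∈ pvPairs grammar FIRST FOLLOW LAST PRECEDE ↔
    (∃ rules ∈ (PySem.Dict.mk grammar).values, ∃ rule ∈ rules, ∃ i ∈ List.range (rule.length - 1),
        y1 = rule.getD i "" ∧ y2 = rule.getD (i + 1) "") ∨
    (∃ nt ∈ (PySem.Dict.mk grammar).keys,
        (y1 ∈ pvTbl LAST nt ∧ y2 ∈ pvTbl FOLLOW nt) ∨
        (y1 ∈ pvTbl PRECEDE nt ∧ y2 ∈ pvTbl FIRST nt)) := by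
  simp only [pvPairs]
  rw [pv_mem_foldl _ _ (fun x nt =>
      (∃ a ∈ pvTbl LAST nt, ∃ b ∈ pvTbl FOLLOW nt, x = (a, b)) ∨
      (∃ a ∈ pvTbl PRECEDE nt, ∃ b ∈ pvTbl FIRST nt, x = (a, b)))]
  · rw [pv_mem_foldl _ _ (fun (x : String × String) (rules : List (List String)) =>
        ∃ rule ∈ rules, ∃ i ∈ List.range (rule.length - 1),
          x = (rule.getD i "", rule.getD (i + 1) "")) ?_ PySem.Set.empty]
    · constructor
      · rintro ((h | ⟨rules, hr, rule, hrr, i, hi, hx⟩) | ⟨nt, hnt, hc⟩)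
        · simp [PySem.Set.empty] at h
        · exact Or.inl ⟨rules, hr, rule, hrr, i, hi, by simp [Prod.ext_iff] at hx; tauto⟩
        · refine Or.inr ⟨nt, hnt, ?_⟩
          rcases hc with ⟨a, ha, b, hb, hx⟩ | ⟨a, ha, b, hb, hx⟩ <;>
            simp [Prod.ext_iff] at hx <;>
            [exact Or.inl ⟨hx.1 ▸ ha, hx.2 ▸ hb⟩; exact Or.inr ⟨hx.1 ▸ ha, hx.2 ▸ hb⟩]
      · rintro (⟨rules, hr, rule, hrr, i, hi, hx1, hx2⟩ | ⟨nt, hnt, hc⟩)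
        · exact Or.inl (Or.inr ⟨rules, hr, rule, hrr, i, hi, by simp [hx1, hx2]⟩)
        · refine Or.inr ⟨nt, hnt, ?_⟩
          rcases hc with ⟨ha, hb⟩ | ⟨ha, hb⟩
          · exact Or.inl ⟨y1, ha, y2, hb, rfl⟩
          · exact Or.inr ⟨y1, ha, y2, hb, rfl⟩
    · intro s rules x
      refine pv_mem_foldl _ _ (fun (x : String × String) (rule : List String) =>
          ∃ i ∈ List.range (rule.length - 1), x = (rule.getD i "", rule.getD (i + 1) "")) ?_ s x
      intro s rule x
      exact pv_mem_foldl _ _ (fun (x : String × String) i => x = (rule.getD i "", rule.getD (i + 1) ""))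
        (fun s i x => PySem.Set.mem_add s _ x) s x
  · intro s nt x
    constructor
    · intro h
      rcases (pv_mem_prod_foldl _ _ _ x).mp h with h' | h'
      · rcases (pv_mem_prod_foldl _ _ _ x).mp h' with h'' | h''
        · exact Or.inl h''
        · exact Or.inr (Or.inl h'')
      · exact Or.inr (Or.inr h')
    · rintro (h | (h | h))
      · exact (pv_mem_prod_foldl _ _ _ x).mpr (Or.inl ((pv_mem_prod_foldl _ _ _ x).mpr (Or.inl h)))
      · exact (pv_mem_prod_foldl _ _ _ x).mpr (Or.inl ((pv_mem_prod_foldl _ _ _ x).mpr (Or.inr h)))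
      · exact (pv_mem_prod_foldl _ _ _ x).mpr (Or.inr h)

lemma pvP_eq_pvQ (grammar : List (String × List (List String))) (FIRST FOLLOW LAST PRECEDE : List (String × List String)) (y1 y2 : String) :
    pvP grammar FIRST FOLLOW LAST PRECEDE y1 y2 = pvQ grammar FIRST FOLLOW LAST PRECEDE y1 y2 := by
  rw [Bool.eq_iff_iff]
  have hq : pvQ grammar FIRST FOLLOW LAST PRECEDE y1 y2 = true ↔
      (y1, y2) ∈ pvPairs grammar FIRST FOLLOW LAST PRECEDE := by
    simp [pvQ, PySem.Set.contains]
  have hflat : ((PySem.Dict.mk grammar).values.foldl (fun acc rules => acc ++ rules) [] :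
      List (List String)) = (PySem.Dict.mk grammar).values.flatten := by
    simpa using PySem.List.foldl_append_eq_flatten (PySem.Dict.mk grammar).values []
  rw [hq, pvPairs_mem]
  simp only [pvP, hflat, pvPairExists, Bool.or_eq_true, List.any_eq_true, Bool.and_eq_true,
    beq_iff_eq, List.mem_flatten, List.contains_iff_mem]
  constructor
  · rintro (hpe | ((hc1 | hc2) | hc3))
    · obtain ⟨rule, ⟨rules, hr, hrr⟩, i, hi, h1, h2⟩ := hpe
      exact Or.inl ⟨rules, hr, rule, hrr, i, hi, h1.symm, h2.symm⟩
    · obtain ⟨nt, hnt, h1, h2⟩ := hc1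
      exact Or.inr ⟨nt, hnt, Or.inl ⟨h1, h2⟩⟩
    · obtain ⟨nt, hnt, h1, h2⟩ := hc2
      exact Or.inr ⟨nt, hnt, Or.inr ⟨h1, h2⟩⟩
    · obtain ⟨nt1, hnt1, nt2, hnt2, ⟨h1, _⟩, h3⟩ := hc3
      exact Or.inr ⟨nt1, hnt1, Or.inl ⟨h1, h3⟩⟩
  · rintro (⟨rules, hr, rule, hrr, i, hi, h1, h2⟩ | ⟨nt, hnt, ⟨h1, h2⟩ | ⟨h1, h2⟩⟩)
    · exact Or.inl ⟨rule, ⟨rules, hr, hrr⟩, i, hi, h1.symm, h2.symm⟩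
    · exact Or.inr (Or.inl (Or.inl ⟨nt, hnt, h1, h2⟩))
    · exact Or.inr (Or.inl (Or.inr ⟨nt, hnt, h1, h2⟩))

lemma pv_modify_modify (d : PySem.Dict String (PySem.Set String)) (k : String) (f g : PySem.Set String → PySem.Set String) :
    (d.modify k [] f).modify k [] g = d.modify k [] (fun s => g (f s)) := by
  simp [PySem.Dict.modify, PySem.Dict.getD_insert_self, PySem.Dict.insert_insert_self]

-- the two conditional adds of A's inner loop body are one conditional add under the disjunction
lemma pv_two_adds (bm : PySem.Dict String (PySem.Set String)) (y1 y2 : String) (a b : Bool) :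
    (if b then (if a then bm.modify y1 [] (fun s => PySem.Set.add s y2) else bm).modify y1 []
        (fun s => PySem.Set.add s y2)
      else (if a then bm.modify y1 [] (fun s => PySem.Set.add s y2) else bm)) =
    if a || b then bm.modify y1 [] (fun s => PySem.Set.add s y2) else bm := by
  cases a <;> cases b <;> simp [pv_modify_modify]

lemma pv_fold_dadd (y1 : String) (vl : List String) (d : PySem.Dict String (PySem.Set String)) (f : PySem.Set String → PySem.Set String) :
    vl.foldl (fun d y2 => pvDadd d y1 y2) (d.modify y1 [] f) = d.modify y1 [] (fun s => vl.foldl PySem.Set.add (f s)) := by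
  induction vl generalizing f with
  | nil => rfl
  | cons v vs ih =>
    simp only [List.foldl_cons]
    rw [show pvDadd (d.modify y1 [] f) y1 v = d.modify y1 [] (fun s => PySem.Set.add (f s) v) from
      pv_modify_modify ..]
    exact ih _

lemma pv_fold_dadd_cons (y1 v : String) (vs : List String) (d : PySem.Dict String (PySem.Set String)) :
    (v :: vs).foldl (fun d y2 => pvDadd d y1 y2) d = d.modify y1 [] (fun s => (v :: vs).foldl PySem.Set.add s) := by
  simp only [List.foldl_cons]
  exact pv_fold_dadd y1 vs d _

lemma pv_foldl_add_absorb (vl : List String) (s : PySem.Set String) (h : ∀ x ∈ vl, x ∈ s) :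
    vl.foldl PySem.Set.add s = s := by
  induction vl generalizing s with
  | nil => rfl
  | cons v vs ih =>
    have hv : PySem.Set.add s v = s := by
      simp only [PySem.Set.add, PySem.Set.contains]
      have := h v (by simp)
      simp_all
    simp only [List.foldl_cons, hv]
    exact ih _ (fun x hx => h x (by simp [hx]))

lemma pv_insert_eq_self (d : PySem.Dict String (PySem.Set String)) (k : String) (v : PySem.Set String) (hnd : d.keys.Nodup) (h : d.get? k = some v) : d.insert k v = d := by
  have hc : d.contains k = true := by rw [PySem.Dict.contains_eq_isSome_get?, h]; rfl
  apply PySem.Dict.ext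
  rw [PySem.Dict.items_insert_of_contains _ _ hc]
  conv_rhs => rw [← List.map_id d.items]
  apply List.map_congr_left
  rintro ⟨p1, p2⟩ hp
  by_cases hk : p1 == k
  · have hk' : p1 = k := by simpa using hk
    subst hk'
    have h2 : d.get? p1 = some p2 := PySem.Dict.get?_of_mem_items d hp hnd
    rw [h] at h2
    simp [Option.some_inj.mp h2]
  · simp [hk]

lemma pv_ofList_append {α : Type} [BEq α] (l : List α) (x : α) :
    PySem.Set.ofList (l ++ [x]) = PySem.Set.add (PySem.Set.ofList l) x := by
  simp [PySem.Set.ofList, List.foldl_append]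

lemma pv_ofList_filter (l : List String) (q : String → Bool) :
    PySem.Set.ofList (l.filter q) = (PySem.Set.ofList l).filter q := by
  induction l using List.reverseRecOn with
  | nil => rfl
  | append_singleton l x ih =>
    rw [List.filter_append, pv_ofList_append]
    by_cases hq : q x
    · simp only [hq, List.filter_cons, List.filter_nil, if_true, pv_ofList_append, ih]
      simp only [PySem.Set.add, PySem.Set.contains]
      by_cases hx : x ∈ PySem.Set.ofList l
      · have hx1 : (PySem.Set.ofList l).contains x = true := by
          simpa [List.contains_iff_mem] using hx
        have hx2 : ((PySem.Set.ofList l).filter q).contains x = true := by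
          simp only [List.contains_iff_mem, List.mem_filter]
          exact ⟨hx, hq⟩
        have hxl : x ∈ l := (PySem.Set.mem_ofList l x).mp hx
        simp [hx1, hx2, hxl, hq]
      · have hx1 : ¬ ((PySem.Set.ofList l).contains x = true) := by
          simpa [List.contains_iff_mem] using hx
        have hx2 : ¬ (((PySem.Set.ofList l).filter q).contains x = true) := by
          simp only [List.contains_iff_mem, List.mem_filter]
          intro hc; exact hx1 (by simpa [List.contains_iff_mem] using hc.1)
        have hxl : x ∉ l := fun h => hx ((PySem.Set.mem_ofList l x).mpr h)
        simp [hx1, hx2, hxl, List.filter_append, hq]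
    · simp only [hq, List.filter_cons, List.filter_nil, if_false, List.append_nil, ih,
        Bool.false_eq_true]
      simp only [PySem.Set.add, PySem.Set.contains]
      split
      · rfl
      · rw [List.filter_append]; simp [hq, ih]

lemma pv_ofList_nodup (l : List String) (h : l.Nodup) : PySem.Set.ofList l = l := by
  induction l using List.reverseRecOn with
  | nil => rfl
  | append_singleton l x ih =>
    rw [pv_ofList_append]
    have hx : x ∉ l := by simp [List.nodup_append] at h; tauto
    have hl : l.Nodup := (List.nodup_append.mp h).1
    rw [ih hl]
    simp only [PySem.Set.add, PySem.Set.contains]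
    simp [hx]

lemma pv_dedup_append (l : List String) (x : String) :
    PySem.List.dedup (l ++ [x]) = if x ∈ l then PySem.List.dedup l else PySem.List.dedup l ++ [x] := by
  simp only [PySem.List.dedup]
  rw [pv_ofList_append]
  simp only [PySem.Set.add, PySem.Set.contains]
  by_cases hx : x ∈ l
  · have : (PySem.Set.ofList l).contains x = true := by
      have := (PySem.Set.mem_ofList l x).mpr hx
      simpa [List.contains_iff_mem] using this
    simp [this, hx]
  · have : ¬ (x ∈ PySem.Set.ofList l) := fun hc => hx ((PySem.Set.mem_ofList l x).mp hc)
    simp [List.contains_iff_mem, this, hx]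

lemma pv_ofList_dedup_filter (ts : List String) (q : String → Bool) :
    PySem.Set.ofList (ts.filter q) = PySem.Set.ofList ((PySem.List.dedup ts).filter q) :=
  calc PySem.Set.ofList (ts.filter q)
      = PySem.Set.ofList (PySem.Set.ofList (ts.filter q)) :=
        (pv_ofList_nodup _ (PySem.Set.nodup_ofList _)).symm
    _ = PySem.Set.ofList ((PySem.Set.ofList ts).filter q) := by rw [pv_ofList_filter]
    _ = PySem.Set.ofList ((PySem.List.dedup ts).filter q) := rfl

lemma pv_filter_dedup_nil (ts : List String) (q : String → Bool) :
    (ts.filter q = [] ↔ (PySem.List.dedup ts).filter q = []) := by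
  simp only [List.filter_eq_nil_iff, PySem.List.dedup]
  constructor
  · intro h x hx
    exact h x ((PySem.Set.mem_ofList ts x).mp hx)
  · intro h x hx
    exact h x ((PySem.Set.mem_ofList ts x).mpr hx)

lemma pv_Bstep_nodup (p : String → String → Bool) (dts : List String) (d : PySem.Dict String (PySem.Set String)) (y : String) (h : d.keys.Nodup) : (pvBstep p dts d y).keys.Nodup := by
  simp only [pvBstep]
  split
  · exact h
  · exact PySem.Dict.nodup_keys_insert _ _ _ h

lemma pv_Bfold_nodup (p : String → String → Bool) (dts : List String) (m : List String) (d : PySem.Dict String (PySem.Set String)) (h : d.keys.Nodup) : (m.foldl (pvBstep p dts) d).keys.Nodup := by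
  induction m generalizing d with
  | nil => exact h
  | cons y m ih => exact ih _ (pv_Bstep_nodup p dts d y h)

lemma pv_Bstep_get?_ne (p : String → String → Bool) (dts : List String) (d : PySem.Dict String (PySem.Set String)) (y z : String) (hne : z ≠ y) : (pvBstep p dts d y).get? z = d.get? z := by
  simp only [pvBstep]
  split
  · rfl
  · exact PySem.Dict.get?_insert_of_ne _ _ hne

lemma pv_Bfold_get? (p : String → String → Bool) (dts : List String) (m : List String) (d : PySem.Dict String (PySem.Set String)) (hm : m.Nodup) (hd : ∀ y ∈ m, d.get? y = none) (y1 : String) :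
    (m.foldl (pvBstep p dts) d).get? y1 =
      if y1 ∈ m ∧ dts.filter (p y1) ≠ [] then some (PySem.Set.ofList (dts.filter (p y1))) else d.get? y1 := by
  induction m generalizing d with
  | nil => simp
  | cons y m ih =>
    simp only [List.foldl_cons]
    have hym : y ∉ m := (List.nodup_cons.mp hm).1
    have hd' : ∀ z ∈ m, (pvBstep p dts d y).get? z = none := by
      intro z hz
      rw [pv_Bstep_get?_ne p dts d y z (fun he => hym (he ▸ hz))]
      exact hd z (by simp [hz])
    rw [ih (pvBstep p dts d y) (List.nodup_cons.mp hm).2 hd']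
    by_cases hy1 : y1 ∈ m
    · have hne : y1 ≠ y := fun he => hym (he ▸ hy1)
      rw [pv_Bstep_get?_ne p dts d y y1 hne]
      simp [hy1]
    · by_cases hyy : y1 = y
      · subst hyy
        have hget : d.get? y1 = none := hd y1 (by simp)
        simp only [pvBstep]
        by_cases hemp : (dts.filter (p y1)).isEmpty
        · have : dts.filter (p y1) = [] := by simpa [List.isEmpty_iff] using hemp
          simp [hy1, hemp, this, hget]
        · have : ¬ (dts.filter (p y1) = []) := by simpa [List.isEmpty_iff] using hemp
          simp [hy1, hemp, this, PySem.Dict.get?_insert_self]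
      · have : y1 ∉ (y :: m) := by simp [hyy, hy1]
        simp only [hy1, false_and, if_false]
        rw [pv_Bstep_get?_ne p dts d y y1 hyy]
        simp [hyy, hy1]

lemma pv_main (p : String → String → Bool) (ts : List String) (l : List String) :
    l.foldl (pvAstep p ts) PySem.Dict.empty =
    (PySem.List.dedup l).foldl (pvBstep p (PySem.List.dedup ts)) PySem.Dict.empty := by
  induction l using List.reverseRecOn with
  | nil => rfl
  | append_singleton l y ih =>
    rw [List.foldl_append, List.foldl_cons, List.foldl_nil, ih, pv_dedup_append]
    have hBnodup : ((PySem.List.dedup l).foldl (pvBstep p (PySem.List.dedup ts))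
        PySem.Dict.empty).keys.Nodup :=
      pv_Bfold_nodup p _ _ _ (by simp [PySem.Dict.empty])
    have hBget : ∀ z, ((PySem.List.dedup l).foldl (pvBstep p (PySem.List.dedup ts))
          PySem.Dict.empty).get? z =
        if z ∈ PySem.List.dedup l ∧ (PySem.List.dedup ts).filter (p z) ≠ []
        then some (PySem.Set.ofList ((PySem.List.dedup ts).filter (p z))) else none := by
      intro z
      rw [pv_Bfold_get? p (PySem.List.dedup ts) _ _
        (show (PySem.List.dedup l).Nodup from PySem.Set.nodup_ofList l) (fun _ _ => rfl) z]
      split <;> rfl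
    by_cases hy : y ∈ l
    · simp only [hy, if_true]
      have hmem : y ∈ PySem.List.dedup l := (PySem.Set.mem_ofList l y).mpr hy
      unfold pvAstep
      cases hvl : ts.filter (p y) with
      | nil => rfl
      | cons v vs =>
        have hvals : (PySem.List.dedup ts).filter (p y) ≠ [] := fun hcon =>
          absurd ((pv_filter_dedup_nil ts (p y)).mpr hcon) (by simp [hvl])
        have hget : ((PySem.List.dedup l).foldl (pvBstep p (PySem.List.dedup ts))
              PySem.Dict.empty).get? y
            = some (PySem.Set.ofList ((PySem.List.dedup ts).filter (p y))) := by
          rw [hBget y]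
          simp only [hmem, hvals, ne_eq, not_false_eq_true, and_self, if_true]
        rw [pv_fold_dadd_cons]
        simp only [PySem.Dict.modify, PySem.Dict.getD_eq_get?_getD, hget, Option.getD_some]
        have habs : (v :: vs).foldl PySem.Set.add
              (PySem.Set.ofList ((PySem.List.dedup ts).filter (p y)))
            = PySem.Set.ofList ((PySem.List.dedup ts).filter (p y)) := by
          apply pv_foldl_add_absorb
          intro x hx
          rw [PySem.Set.mem_ofList]
          rw [← hvl] at hx
          rcases List.mem_filter.mp hx with ⟨hxts, hpx⟩
          exact List.mem_filter.mpr ⟨(PySem.Set.mem_ofList ts x).mpr hxts, hpx⟩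
        rw [habs]
        exact pv_insert_eq_self _ y _ hBnodup hget
    · simp only [hy, if_false, List.foldl_append, List.foldl_cons, List.foldl_nil]
      have hmem : y ∉ PySem.List.dedup l := fun hc => hy ((PySem.Set.mem_ofList l y).mp hc)
      have hget : ((PySem.List.dedup l).foldl (pvBstep p (PySem.List.dedup ts))
            PySem.Dict.empty).get? y = none := by
        rw [hBget y]
        simp [hmem, hy]
      unfold pvAstep
      cases hvl : ts.filter (p y) with
      | nil =>
        have hvals : (PySem.List.dedup ts).filter (p y) = [] := (pv_filter_dedup_nil ts (p y)).mp hvl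
        simp only [pvBstep, hvals, List.isEmpty_nil, if_true, List.foldl_nil]
      | cons v vs =>
        have hvals : (PySem.List.dedup ts).filter (p y) ≠ [] := fun hcon =>
          absurd ((pv_filter_dedup_nil ts (p y)).mpr hcon) (by simp [hvl])
        rw [pv_fold_dadd_cons]
        have hne : ¬ (((PySem.List.dedup ts).filter (p y)).isEmpty = true) := by
          simpa [List.isEmpty_iff] using hvals
        have h1 : (v :: vs).foldl PySem.Set.add ([] : PySem.Set String)
            = PySem.Set.ofList (ts.filter (p y)) := by rw [hvl]; rfl
        simp only [pvBstep, PySem.Dict.modify, PySem.Dict.getD_eq_get?_getD, hget, Option.getD_none]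
        rw [h1, pv_ofList_dedup_filter ts (p y), if_neg hne]

lemma pv_portA_eq (grammar : List (String × List (List String))) (terminals : List String) (FIRST FOLLOW LAST PRECEDE : List (String × List String)) :
    build_bigramms grammar terminals FIRST FOLLOW LAST PRECEDE =
      (terminals.foldl (pvAstep (pvP grammar FIRST FOLLOW LAST PRECEDE) terminals) PySem.Dict.empty).items := by
  simp only [build_bigramms]
  congr 1
  apply PySem.List.foldl_congr_mem
  intro bm y1 _
  have h2 : terminals.foldl (fun bm y2 =>
        if pvP grammar FIRST FOLLOW LAST PRECEDE y1 y2 then pvDadd bm y1 y2 else bm) bm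
      = pvAstep (pvP grammar FIRST FOLLOW LAST PRECEDE) terminals bm y1 := by
    unfold pvAstep
    rw [PySem.List.foldl_if_eq_foldl_filter (pvP grammar FIRST FOLLOW LAST PRECEDE y1)
      (fun d y2 => pvDadd d y1 y2)]
  rw [← h2]
  apply PySem.List.foldl_congr_mem
  intro acc y2 _
  rw [pv_two_adds acc y1 y2]
  simp only [pvP, pvDadd]

lemma pv_portB_eq (grammar : List (String × List (List String))) (terminals : List String) (FIRST FOLLOW LAST PRECEDE : List (String × List String)) :
    build_bigramms_alt grammar terminals FIRST FOLLOW LAST PRECEDE =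
      ((PySem.List.dedup terminals).foldl (pvBstep (pvQ grammar FIRST FOLLOW LAST PRECEDE) (PySem.List.dedup terminals)) PySem.Dict.empty).items := rfl

-- ===== VERDICT (by name: the statement is the Claim_ definition above) =====
theorem build_bigramms_spec : Claim_equal_build_bigramms := by
  intro grammar terminals FIRST FOLLOW LAST PRECEDE _ _
  unfold Spec_build_bigramms
  rw [pv_portA_eq, pv_portB_eq]
  have hp : pvAstep (pvP grammar FIRST FOLLOW LAST PRECEDE) terminals
      = pvAstep (pvQ grammar FIRST FOLLOW LAST PRECEDE) terminals := by
    funext d y1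
    unfold pvAstep
    rw [List.filter_congr (fun y2 _ => pvP_eq_pvQ grammar FIRST FOLLOW LAST PRECEDE y1 y2)]
  rw [hp, pv_main]
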